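-- pv_equiv track=rewrite | github.com/tobiasHeinke/monostyle | monostyle/spelling.py | split_lexicon
-- ===== SOURCE A (Python) =====
-- def split_lexicon(lexicon_flat):
--     """Split lexicon by first char."""
--     lexicon = dict()
--     for entry in lexicon_flat:
--         first_char = entry[0][0]
--         if first_char not in lexicon.keys():
--             lexicon.setdefault(first_char, [])
--         lexicon[first_char].append(entry)
--
--     return lexicon
-- ===== SOURCE B (Python) =====
-- def split_lexicon(lexicon_flat):
--     """Split lexicon by first char."""
--     keys = list(dict.fromkeys(entry[0][0] for entry in lexicon_flat))
--     return {key: [entry for entry in lexicon_flat if entry[0][0] == key]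
--             for key in keys}
-- ===== Notes on version B (the rewrite author's own statement) =====
-- stated objective: alternative
-- what changed: B replaces A's streaming dict-of-accumulating-lists with a two-pass index build: first collect the distinct first characters in appearance order, then build each group with a per-key filter comprehension.
import Mathlib
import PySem

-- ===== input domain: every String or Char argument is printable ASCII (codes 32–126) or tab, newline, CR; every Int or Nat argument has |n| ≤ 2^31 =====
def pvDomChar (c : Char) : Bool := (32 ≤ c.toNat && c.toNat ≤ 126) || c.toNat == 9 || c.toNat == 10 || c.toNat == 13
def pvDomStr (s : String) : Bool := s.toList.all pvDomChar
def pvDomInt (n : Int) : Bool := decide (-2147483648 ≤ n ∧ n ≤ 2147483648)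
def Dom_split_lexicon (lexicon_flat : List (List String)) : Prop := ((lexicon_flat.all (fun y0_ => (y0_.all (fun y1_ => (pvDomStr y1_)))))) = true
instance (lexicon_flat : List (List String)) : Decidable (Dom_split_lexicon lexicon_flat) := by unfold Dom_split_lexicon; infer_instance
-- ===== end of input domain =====

-- B builds the groups by a two-pass index (distinct first chars, then one filter per key)
-- instead of A's streaming dict of accumulating lists; same return value, similar cost.


-- ===== PORT A =====
-- entry[0][0] as a one-character string; the .getD defaults are only reached where
-- Python raises IndexError, and those inputs are excluded by Pre_split_lexicon.
def pvFirstChar (entry : List String) : String :=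
  String.ofList [(PySem.Str.pyGet? ((PySem.List.pyGet? entry 0).getD "") 0).getD ' ']

def split_lexicon (lexicon_flat : List (List String)) : List (String × List (List String)) :=
  (lexicon_flat.foldl
    (fun lexicon entry =>
      let first_char := pvFirstChar entry
      let lexicon := if !(lexicon.keys.contains first_char)
                       then lexicon.setdefault first_char [] else lexicon
      lexicon.modify first_char [] (fun v => v ++ [entry]))
    PySem.Dict.empty).items

-- ===== PORT B =====
def split_lexicon_alt (lexicon_flat : List (List String)) : List (String × List (List String)) :=
  (PySem.Set.ofList (lexicon_flat.map pvFirstChar)).map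
    (fun key => (key, lexicon_flat.filter (fun entry => pvFirstChar entry == key)))

-- ===== PRECONDITION & SPEC =====
-- Pre_ excludes exactly the inputs where Python A raises IndexError on entry[0][0]:
-- an empty entry list or an entry whose first string is empty.
def Pre_split_lexicon (lexicon_flat : List (List String)) : Prop :=
  ∀ entry ∈ lexicon_flat, entry ≠ [] ∧ entry.headD "" ≠ ""
instance (lexicon_flat : List (List String)) : Decidable (Pre_split_lexicon lexicon_flat) := by unfold Pre_split_lexicon; infer_instance
def pvWitness_split_lexicon : List (List String) := [["ab", "x"], ["b"], ["a?"]]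

def Spec_split_lexicon (lexicon_flat : List (List String)) (out : List (String × List (List String))) : Prop := out = split_lexicon_alt lexicon_flat
instance (lexicon_flat : List (List String)) (out : List (String × List (List String))) : Decidable (Spec_split_lexicon lexicon_flat out) := by unfold Spec_split_lexicon; infer_instance

-- ===== CLAIM (what is proved, stated in full; the proofs are below) =====
def Claim_equal_split_lexicon : Prop := ∀ (lexicon_flat : List (List String)), Dom_split_lexicon lexicon_flat → Pre_split_lexicon lexicon_flat → Spec_split_lexicon lexicon_flat (split_lexicon lexicon_flat)

-- ===== LEMMAS AND PROOFS =====

theorem keysContains_eq_contains (d : PySem.Dict String (List (List String))) (k : String) :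
    d.keys.contains k = d.contains k := by
  by_cases hm : k ∈ d.keys
  · simp [hm, (PySem.Dict.contains_iff_mem_keys (d := d) (k := k)).mpr hm]
  · have hc : d.contains k = false := by
      cases h : d.contains k
      · rfl
      · exact absurd ((PySem.Dict.contains_iff_mem_keys (d := d) (k := k)).mp h) hm
    simp [hm, hc]

-- A's loop body collapses to a single modify: when the key is absent, setdefault k []
-- then append = insert (k, [e]) at the end, which is what modify with default [] does.
theorem stepA_eq_modify (d : PySem.Dict String (List (List String))) (e : List String) :
    (let first_char := pvFirstChar e
     let d' := if !(d.keys.contains first_char) then d.setdefault first_char [] else d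
     d'.modify first_char [] (fun v => v ++ [e]))
      = d.modify (pvFirstChar e) [] (fun v => v ++ [e]) := by
  simp only [keysContains_eq_contains]
  cases h : d.contains (pvFirstChar e)
  · simp only [Bool.not_false, if_true,
      PySem.Dict.setdefault_of_not_contains d [] h, PySem.Dict.modify]
    rw [PySem.Dict.getD_insert_self, PySem.Dict.insert_insert_self,
      PySem.Dict.getD_of_not_contains d [] h]
  · simp

theorem foldlA_items (l : List (List String)) :
    (l.foldl (fun d e => d.modify (pvFirstChar e) [] (fun v => v ++ [e])) PySem.Dict.empty).items
      = split_lexicon_alt l := by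
  have hkeys : (l.foldl (fun d e => d.modify (pvFirstChar e) [] (fun v => v ++ [e]))
      PySem.Dict.empty).keys = PySem.Set.ofList (l.map pvFirstChar) := by
    rw [PySem.Dict.keys_foldl_modify_key l pvFirstChar []
      (fun _ e => (fun v => v ++ [e])) PySem.Dict.empty]
    exact PySem.Set.update_nil_left _
  have hnd : (l.foldl (fun d e => d.modify (pvFirstChar e) [] (fun v => v ++ [e]))
      PySem.Dict.empty).keys.Nodup :=
    PySem.Dict.nodup_keys_foldl_modify_key l pvFirstChar []
      (fun _ e => (fun v => v ++ [e])) PySem.Dict.empty PySem.Dict.nodup_keys_empty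
  have hgetD : ∀ k, (l.foldl (fun d e => d.modify (pvFirstChar e) [] (fun v => v ++ [e]))
      PySem.Dict.empty).getD k [] = l.filter (fun e => pvFirstChar e == k) := by
    intro k
    have hm : l.foldl (fun d e => d.modify (pvFirstChar e) [] (fun v => v ++ [e]))
        PySem.Dict.empty
        = (l.map (fun e => (pvFirstChar e, e))).foldl
            (fun d p => d.modify p.1 [] (fun v => v ++ [p.2])) PySem.Dict.empty := by
      rw [List.foldl_map]
    rw [hm, PySem.Dict.getD_foldl_modify_append, PySem.Dict.getD_empty, List.filter_map,
      List.map_map, List.nil_append]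
    have h1 : ((fun x : String × List String => x.2) ∘ fun e => (pvFirstChar e, e)) = id := rfl
    rw [h1, List.map_id]
    rfl
  rw [PySem.Dict.items_eq_map_keys _ hnd [], hkeys]
  unfold split_lexicon_alt
  exact List.map_congr_left (fun k _ => by rw [hgetD k])

-- ===== VERDICT (by name: the statement is the Claim_ definition above) =====
theorem split_lexicon_spec : Claim_equal_split_lexicon := by
  intro l _ _
  unfold Spec_split_lexicon split_lexicon
  have hstep : (fun (lexicon : PySem.Dict String (List (List String))) entry =>
      let first_char := pvFirstChar entry
      let lexicon := if !(lexicon.keys.contains first_char)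
                       then lexicon.setdefault first_char [] else lexicon
      lexicon.modify first_char [] (fun v => v ++ [entry]))
      = (fun d e => d.modify (pvFirstChar e) [] (fun v => v ++ [e])) := by
    funext d e; exact stepA_eq_modify d e
  rw [hstep]
  exact foldlA_items l
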